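-- pv_equiv track=rewrite | github.com/jorgefpont/csf003c | test_file.py | doubleDigits2
-- ===== SOURCE A (Python) =====
-- def doubleDigits2(num):
--    if num < 0:
--       return - doubleDigits2(-num)
--    elif num == 0:
--       return 0
--    else:
--       digit = num % 10
--       rest = num // 10
--       return digit + 10 * digit + 100 * doubleDigits2(rest)
-- ===== SOURCE B (Python) =====
-- def doubleDigits2(num):
--     res = 0
--     for ch in str(abs(num)):
--         res = res * 100 + int(ch) * 11
--     return -res if num < 0 else res
-- ===== Notes on version B (the rewrite author's own statement) =====
-- stated objective: idiomatic
-- what changed: Replaces A's sign-splitting arithmetic recursion (extract the low digit with mod and floor-division, combine with the recursive result of the rest) with a single left-to-right Horner loop over the decimal string of abs(num), negating at the end.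
import Mathlib
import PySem

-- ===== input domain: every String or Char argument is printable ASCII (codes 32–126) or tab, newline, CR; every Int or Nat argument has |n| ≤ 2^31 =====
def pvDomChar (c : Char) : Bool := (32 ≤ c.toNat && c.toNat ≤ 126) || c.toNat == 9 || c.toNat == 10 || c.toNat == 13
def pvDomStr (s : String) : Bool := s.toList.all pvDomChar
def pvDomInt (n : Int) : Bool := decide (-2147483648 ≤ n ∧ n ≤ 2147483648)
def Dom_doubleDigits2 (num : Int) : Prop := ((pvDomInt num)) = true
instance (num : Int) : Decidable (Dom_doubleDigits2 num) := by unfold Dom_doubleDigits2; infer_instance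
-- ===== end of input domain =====

-- B replaces A's arithmetic recursion with a Horner loop over str(abs(num)); same values, no speed claim.

-- ===== PORT A =====
-- literal port of A's recursion; terminates because the negative branch fires at
-- most once and n // 10 shrinks |n| for positive n
def doubleDigits2 (num : Int) : Int :=
  if num < 0 then - doubleDigits2 (-num)
  else if num = 0 then 0
  else
    let digit := PySem.Int.mod num 10
    let rest := PySem.Int.floordiv num 10
    digit + 10 * digit + 100 * doubleDigits2 rest
termination_by 2 * num.natAbs + (if num < 0 then 1 else 0)
decreasing_by
  · split_ifs <;> omega
  · have h2 : PySem.Int.floordiv num 10 = num / 10 := by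
      rw [PySem.Int.floordiv, Int.fdiv_eq_ediv]; simp
    simp only [h2]
    split_ifs <;> omega

-- ===== PORT B =====
-- int(ch) on a single decimal-digit character (all str(abs(num)) produces) is
-- ported exactly as the code-point offset from '0' (48)
def doubleDigits2_alt (num : Int) : Int :=
  let res := (PySem.Int.toStr |num|).toList.foldl
    (fun res ch => res * 100 + ((ch.toNat : Int) - 48) * 11) 0
  if num < 0 then -res else res

-- ===== PRECONDITION & SPEC =====
def Spec_doubleDigits2 (num : Int) (out : Int) : Prop := out = doubleDigits2_alt num
instance (num : Int) (out : Int) : Decidable (Spec_doubleDigits2 num out) := by unfold Spec_doubleDigits2; infer_instance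

-- ===== CLAIM (what is proved, stated in full; the proofs are below) =====
def Claim_equal_doubleDigits2 : Prop := ∀ (num : Int), Dom_doubleDigits2 num → Spec_doubleDigits2 num (doubleDigits2 num)

-- ===== LEMMAS AND PROOFS =====

-- the characters Nat.toDigits 10 produces, written via Mathlib's Nat.digits
def pvDChars (n : Nat) : List Char :=
  if n = 0 then ['0'] else ((Nat.digits 10 n).reverse.map Nat.digitChar)

theorem pv_toDigitsCore_eq : ∀ (fuel n : Nat) (acc : List Char), n < fuel →
    Nat.toDigitsCore 10 fuel n acc = pvDChars n ++ acc := by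
  intro fuel
  induction fuel with
  | zero => intro n acc h; omega
  | succ f ih =>
    intro n acc h
    simp only [Nat.toDigitsCore]
    by_cases h0 : n / 10 = 0
    · rw [if_pos h0]
      rcases Nat.eq_zero_or_pos n with h1 | h1
      · subst h1; rfl
      · simp only [pvDChars]
        rw [if_neg (by omega), Nat.digits_def' (by norm_num) h1, h0, Nat.digits_zero]
        simp
    · rw [if_neg h0, ih (n / 10) _ (by omega)]
      simp only [pvDChars]
      rw [if_neg h0, if_neg (by omega : ¬ n = 0),
        Nat.digits_def' (by norm_num) (by omega : 0 < n)]
      simp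

theorem pv_toDigits_eq (n : Nat) : Nat.toDigits 10 n = pvDChars n := by
  rw [Nat.toDigits, pv_toDigitsCore_eq (n + 1) n [] (by omega), List.append_nil]

theorem pv_digitChar_val {d : Nat} (hd : d < 10) :
    ((Nat.digitChar d).toNat : Int) - 48 = (d : Int) := by
  interval_cases d <;> decide

-- B's Horner step
def pvStep (res : Int) (ch : Char) : Int := res * 100 + ((ch.toNat : Int) - 48) * 11

theorem pv_fold_digits : ∀ (n : Nat),
    List.foldl pvStep 0 ((Nat.digits 10 n).reverse.map Nat.digitChar) = doubleDigits2 (n : Int) := by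
  intro n
  induction n using Nat.strong_induction_on with
  | _ n ih =>
    rcases Nat.eq_zero_or_pos n with h0 | h0
    · subst h0
      simp [doubleDigits2]
    · rw [Nat.digits_def' (by norm_num) h0]
      simp only [List.reverse_cons, List.map_append, List.map_cons, List.map_nil,
        List.foldl_append, List.foldl_cons, List.foldl_nil]
      rw [ih (n / 10) (Nat.div_lt_self h0 (by norm_num))]
      rw [pvStep, pv_digitChar_val (Nat.mod_lt n (by norm_num))]
      conv_rhs => rw [doubleDigits2]
      rw [if_neg (by omega : ¬ ((n : Int) < 0)), if_neg (by exact_mod_cast h0.ne')]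
      have hm : PySem.Int.mod (n : Int) 10 = ((n % 10 : Nat) : Int) := by
        rw [PySem.Int.mod, Int.fmod_eq_emod, if_pos (Or.inl (by norm_num))]
        push_cast
        simp
      have hd : PySem.Int.floordiv (n : Int) 10 = ((n / 10 : Nat) : Int) := by
        rw [PySem.Int.floordiv, Int.fdiv_eq_ediv, if_pos (Or.inl (by norm_num))]
        push_cast
        simp
      rw [hm, hd]
      ring

theorem pv_fold_dchars (n : Nat) :
    List.foldl pvStep 0 (pvDChars n) = doubleDigits2 (n : Int) := by
  rcases Nat.eq_zero_or_pos n with h0 | h0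
  · subst h0
    simp [pvDChars, pvStep, doubleDigits2]
  · rw [pvDChars, if_neg h0.ne', pv_fold_digits]

theorem pv_alt_nonneg (num : Int) (h : 0 ≤ num) :
    doubleDigits2_alt num = doubleDigits2 num := by
  rw [doubleDigits2_alt]
  simp only [if_neg (by omega : ¬ num < 0)]
  have habs : |num| = (num.toNat : Int) := by
    rw [abs_of_nonneg h]; omega
  rw [habs, PySem.Int.toList_toStr, PySem.Int.toChars,
    if_neg (by omega : ¬ ((num.toNat : Int) < 0)), Int.toNat_natCast,
    pv_toDigits_eq]
  calc List.foldl (fun res ch => res * 100 + ((ch.toNat : Int) - 48) * 11) 0 (pvDChars num.toNat)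
      = List.foldl pvStep 0 (pvDChars num.toNat) := rfl
    _ = doubleDigits2 ((num.toNat : Nat) : Int) := pv_fold_dchars num.toNat
    _ = doubleDigits2 num := by rw [Int.toNat_of_nonneg h]

-- ===== VERDICT (by name: the statement is the Claim_ definition above) =====
theorem doubleDigits2_spec : Claim_equal_doubleDigits2 := by
  intro num _
  unfold Spec_doubleDigits2
  rcases le_or_gt 0 num with h | h
  · exact (pv_alt_nonneg num h).symm
  · rw [doubleDigits2, if_pos h, ← pv_alt_nonneg (-num) (by omega)]
    rw [doubleDigits2_alt, doubleDigits2_alt]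
    simp only [abs_neg, if_neg (by omega : ¬ -num < 0), if_pos h]
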